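-- pv_equiv track=rewrite | github.com/sajjadGG/euphony-PS | property_signatures.py | input_output_both_odd
-- ===== SOURCE A (Python) =====
-- AllTrue = -1
--
-- Mixed = 0
--
-- AllFalse = 1
--
-- def input_output_both_odd(input_output, key):
--     is_true_present = False
--     is_false_present = False
--     for in_out in input_output:
--         program_input = in_out[key]
--         output = in_out['out']
--         if program_input % 2 == 1 and output % 2 == 1:
--             is_true_present = True
--         else:
--             is_false_present = True
--
--     if is_true_present and is_false_present:
--         return Mixed
--     elif is_true_present:
--         return AllTrue
--     else:
--         return AllFalse
-- ===== SOURCE B (Python) =====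
-- AllTrue = -1
-- Mixed = 0
-- AllFalse = 1
--
-- def input_output_both_odd(input_output, key):
--     def both_odd(in_out):
--         return in_out[key] % 2 == 1 and in_out['out'] % 2 == 1
--     if not any(map(both_odd, input_output)):
--         return AllFalse
--     if all(map(both_odd, input_output)):
--         return AllTrue
--     return Mixed
-- ===== Notes on version B (the rewrite author's own statement) =====
-- stated objective: idiomatic
-- what changed: Replaces the single-pass two-boolean-flag accumulator by two staged short-circuiting passes: any(both_odd) decides AllFalse first, then all(both_odd) separates AllTrue from Mixed.
import Mathlib
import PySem

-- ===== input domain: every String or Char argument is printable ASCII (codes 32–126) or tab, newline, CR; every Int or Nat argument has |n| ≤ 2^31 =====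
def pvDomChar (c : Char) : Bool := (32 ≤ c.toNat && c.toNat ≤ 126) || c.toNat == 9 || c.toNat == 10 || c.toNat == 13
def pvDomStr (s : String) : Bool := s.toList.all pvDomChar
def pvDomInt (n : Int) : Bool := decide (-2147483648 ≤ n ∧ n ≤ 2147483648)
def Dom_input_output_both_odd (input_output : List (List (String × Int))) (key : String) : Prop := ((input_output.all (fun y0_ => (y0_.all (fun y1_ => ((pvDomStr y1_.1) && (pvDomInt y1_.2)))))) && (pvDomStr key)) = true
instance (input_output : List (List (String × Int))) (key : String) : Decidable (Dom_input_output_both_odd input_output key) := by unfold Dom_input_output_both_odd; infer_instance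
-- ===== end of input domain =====

-- B replaces A's single-pass two-flag accumulator by two staged short-circuiting passes (any, then all).

-- ===== PORT A =====
-- dict lookup in_out[key] = first match in the association list; Pre_ guarantees the key
-- is present, so the `.getD 0` default is never reached on admitted inputs (Python raises KeyError there).
def input_output_both_odd (input_output : List (List (String × Int))) (key : String) : Int :=
  let st := input_output.foldl (fun (st : Bool × Bool) in_out =>
    let program_input := (in_out.lookup key).getD 0
    let output := (in_out.lookup "out").getD 0
    if PySem.Int.mod program_input 2 == 1 && PySem.Int.mod output 2 == 1 then
      (true, st.2)
    else
      (st.1, true)) (false, false)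
  if st.1 && st.2 then 0
  else if st.1 then -1
  else 1

-- ===== PORT B =====
def bothOdd (key : String) (in_out : List (String × Int)) : Bool :=
  PySem.Int.mod ((in_out.lookup key).getD 0) 2 == 1 &&
  PySem.Int.mod ((in_out.lookup "out").getD 0) 2 == 1

def input_output_both_odd_alt (input_output : List (List (String × Int))) (key : String) : Int :=
  if !(input_output.any (bothOdd key)) then 1
  else if input_output.all (bothOdd key) then -1
  else 0

-- ===== PRECONDITION & SPEC =====
-- Pre_ excludes exactly the inputs where Python A raises KeyError: some entry missing `key` or 'out'.
def Pre_input_output_both_odd (input_output : List (List (String × Int))) (key : String) : Prop :=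
  (input_output.all (fun in_out => in_out.any (·.1 == key) && in_out.any (·.1 == "out"))) = true
instance (input_output : List (List (String × Int))) (key : String) : Decidable (Pre_input_output_both_odd input_output key) := by unfold Pre_input_output_both_odd; infer_instance
def pvWitness_input_output_both_odd : (List (List (String × Int))) × String :=
  ([[("x", 1), ("out", 3)], [("x", 2), ("out", 1)]], "x")
def Spec_input_output_both_odd (input_output : List (List (String × Int))) (key : String) (out : Int) : Prop := out = input_output_both_odd_alt input_output key
instance (input_output : List (List (String × Int))) (key : String) (out : Int) : Decidable (Spec_input_output_both_odd input_output key out) := by unfold Spec_input_output_both_odd; infer_instance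

-- ===== CLAIM (what is proved, stated in full; the proofs are below) =====
def Claim_equal_input_output_both_odd : Prop := ∀ (input_output : List (List (String × Int))) (key : String), Dom_input_output_both_odd input_output key → Pre_input_output_both_odd input_output key → Spec_input_output_both_odd input_output key (input_output_both_odd input_output key)

-- ===== LEMMAS AND PROOFS =====

-- Loop invariant: A's two flags are "some entry satisfies p" and "some entry fails p", or-ed onto the start state.
theorem flags_eq_any (p : List (String × Int) → Bool) :
    ∀ (l : List (List (String × Int))) (st : Bool × Bool),
      l.foldl (fun (st : Bool × Bool) d => if p d then (true, st.2) else (st.1, true)) st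
        = (st.1 || l.any p, st.2 || l.any (fun d => !p d)) := by
  intro l
  induction l with
  | nil => intro st; simp
  | cons d tl ih =>
    intro st
    by_cases h : p d = true <;>
      simp [List.foldl_cons, h, ih]

-- ===== VERDICT (by name: the statement is the Claim_ definition above) =====
theorem input_output_both_odd_spec : Claim_equal_input_output_both_odd := by
  intro io key _ _
  unfold Spec_input_output_both_odd input_output_both_odd input_output_both_odd_alt
  rw [flags_eq_any]
  have e1 : (io.any fun in_out =>
      PySem.Int.mod ((List.lookup key in_out).getD 0) 2 == 1 &&
        PySem.Int.mod ((List.lookup "out" in_out).getD 0) 2 == 1) = io.any (bothOdd key) := rfl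
  have e2 : (io.any fun d =>
      !(PySem.Int.mod ((List.lookup key d).getD 0) 2 == 1 &&
          PySem.Int.mod ((List.lookup "out" d).getD 0) 2 == 1)) =
      io.any (fun d => !bothOdd key d) := rfl
  simp only [Bool.false_or, List.all_eq_not_any_not, e1, e2]
  cases hA : io.any (bothOdd key) <;>
  cases hF : io.any (fun d => !bothOdd key d) <;>
    simp [hA, hF]
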